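-- pv_equiv track=rewrite | github.com/XanderYoon/multiagent-arena | game_engine.py | normalize_blotto_allocation
-- ===== SOURCE A (Python) =====
-- def normalize_blotto_allocation(allocation, troop_budget, battlefields):
--     if not isinstance(allocation, list):
--         return None
--     if len(allocation) != battlefields:
--         return None
--     if any(not isinstance(value, int) for value in allocation):
--         return None
--     if any(value < 0 for value in allocation):
--         return None
--     if sum(allocation) != troop_budget:
--         return None
--     return list(allocation)
-- ===== SOURCE B (Python) =====
-- def _alloc_rec(allocation, budget, fields):
--     """Recursively consume one element per battlefield, threading the
--     remaining budget down; rebuild the validated list on the way back up."""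
--     if not allocation:
--         return [] if fields == 0 and budget == 0 else None
--     if fields == 0:
--         return None
--     head = allocation[0]
--     if not isinstance(head, int) or head < 0:
--         return None
--     rest = _alloc_rec(allocation[1:], budget - head, fields - 1)
--     if rest is None:
--         return None
--     return [head] + rest
--
--
-- def normalize_blotto_allocation(allocation, troop_budget, battlefields):
--     if not isinstance(allocation, list):
--         return None
--     return _alloc_rec(allocation, troop_budget, battlefields)
-- ===== Notes on version B (the rewrite author's own statement) =====
-- stated objective: alternative
-- what changed: Replaced A's staged whole-list checks (len ==, two any() scans, sum()) by a structural recursion that consumes one battlefield per element, threads the remaining budget downward, and rebuilds the validated list on the way back up; no length or sum is ever computed.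
import Mathlib
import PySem

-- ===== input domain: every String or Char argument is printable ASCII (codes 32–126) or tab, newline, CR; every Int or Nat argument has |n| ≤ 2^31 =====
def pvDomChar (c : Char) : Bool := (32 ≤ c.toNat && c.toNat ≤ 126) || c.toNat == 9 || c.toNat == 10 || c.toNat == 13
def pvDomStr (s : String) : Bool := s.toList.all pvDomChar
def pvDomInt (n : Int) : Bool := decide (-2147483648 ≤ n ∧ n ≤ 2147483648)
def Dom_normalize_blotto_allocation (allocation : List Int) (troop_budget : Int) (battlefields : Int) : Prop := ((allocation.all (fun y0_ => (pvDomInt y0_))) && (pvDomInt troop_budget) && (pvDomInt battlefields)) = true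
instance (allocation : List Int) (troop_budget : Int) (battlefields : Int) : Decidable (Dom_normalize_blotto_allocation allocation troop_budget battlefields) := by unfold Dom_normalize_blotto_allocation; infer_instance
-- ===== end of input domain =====

-- ===== PORT A =====
-- Port of A: staged checks — length guard, negativity scan (the isinstance scan is vacuous for List Int), sum check, then copy.
def normalize_blotto_allocation (allocation : List Int) (troop_budget : Int) (battlefields : Int) : Option (List Int) :=
  if (allocation.length : Int) ≠ battlefields then none
  else if allocation.any (fun value => decide (value < 0)) then none
  else if allocation.sum ≠ troop_budget then none
  else some allocation

-- ===== PORT B =====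
-- B: structural recursion consuming one battlefield per element, threading the remaining budget down,
-- rebuilding the validated list on the way back up; no length or sum is computed.
def pvAllocRec : List Int → Int → Int → Option (List Int)
  | [], budget, fields => if fields = 0 ∧ budget = 0 then some [] else none
  | head :: restl, budget, fields =>
      if fields = 0 then none
      else if head < 0 then none
      else match pvAllocRec restl (budget - head) (fields - 1) with
        | none => none
        | some r => some (head :: r)

def normalize_blotto_allocation_alt (allocation : List Int) (troop_budget : Int) (battlefields : Int) : Option (List Int) :=
  pvAllocRec allocation troop_budget battlefields

-- ===== PRECONDITION & SPEC =====
def Spec_normalize_blotto_allocation (allocation : List Int) (troop_budget : Int) (battlefields : Int) (out : Option (List Int)) : Prop := out = normalize_blotto_allocation_alt allocation troop_budget battlefields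
instance (allocation : List Int) (troop_budget : Int) (battlefields : Int) (out : Option (List Int)) : Decidable (Spec_normalize_blotto_allocation allocation troop_budget battlefields out) := by unfold Spec_normalize_blotto_allocation; infer_instance

-- ===== CLAIM (what is proved, stated in full; the proofs are below) =====
def Claim_equal_normalize_blotto_allocation : Prop := ∀ (allocation : List Int) (troop_budget : Int) (battlefields : Int), Dom_normalize_blotto_allocation allocation troop_budget battlefields → Spec_normalize_blotto_allocation allocation troop_budget battlefields (normalize_blotto_allocation allocation troop_budget battlefields)

-- ===== LEMMAS AND PROOFS =====

-- ===== VERDICT (by name: the statement is the Claim_ definition above) =====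
lemma pvAllocRec_eq (xs : List Int) (b f : Int) :
    pvAllocRec xs b f =
      if (xs.length : Int) = f ∧ xs.all (fun v => decide (0 ≤ v)) ∧ xs.sum = b
      then some xs else none := by
  induction xs generalizing b f with
  | nil =>
    simp only [pvAllocRec, List.length_nil, List.all_nil, List.sum_nil, Nat.cast_zero, true_and]
    by_cases h : f = 0 ∧ b = 0
    · rw [if_pos h, if_pos (by omega)]
    · rw [if_neg h, if_neg (by omega)]
  | cons a l ih =>
    simp only [pvAllocRec, List.length_cons, List.all_cons, List.sum_cons]
    by_cases hf : f = 0
    · subst hf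
      rw [if_pos rfl, if_neg]
      rintro ⟨h1, -⟩
      omega
    · rw [if_neg hf]
      by_cases ha : a < 0
      · rw [if_pos ha]
        split_ifs with h
        · exfalso
          have := h.2.1
          simp at this
          omega
        · rfl
      · rw [if_neg ha, ih (b - a) (f - 1)]
        by_cases hc : (l.length : Int) = f - 1 ∧ l.all (fun v => decide (0 ≤ v)) ∧ l.sum = b - a
        · rw [if_pos hc, if_pos]
          refine ⟨by omega, ?_, by omega⟩
          simp [hc.2.1]
          omega
        · rw [if_neg hc, if_neg]
          intro h
          apply hc
          obtain ⟨h1, h2, h3⟩ := h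
          simp only [Bool.and_eq_true, decide_eq_true_eq] at h2
          refine ⟨by omega, ?_, by omega⟩
          exact h2.2

-- ===== VERDICT =====
theorem normalize_blotto_allocation_spec : Claim_equal_normalize_blotto_allocation := by
  intro allocation troop_budget battlefields _
  unfold Spec_normalize_blotto_allocation normalize_blotto_allocation normalize_blotto_allocation_alt
  rw [pvAllocRec_eq]
  by_cases hl : (allocation.length : Int) = battlefields
  · by_cases hneg : allocation.any (fun v => decide (v < 0)) = true
    · have hn : ¬ allocation.all (fun v => decide (0 ≤ v)) = true := by
        simp only [List.any_eq_true, decide_eq_true_eq] at hneg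
        obtain ⟨x, hx, hxneg⟩ := hneg
        simp only [List.all_eq_true, decide_eq_true_eq]
        push Not
        exact ⟨x, hx, by omega⟩
      simp [hl, hneg, hn]
    · have hp : allocation.all (fun v => decide (0 ≤ v)) = true := by
        simp only [List.any_eq_true, decide_eq_true_eq] at hneg
        push Not at hneg
        simp only [List.all_eq_true, decide_eq_true_eq]
        intro x hx; have := hneg x hx; omega
      by_cases hs : allocation.sum = troop_budget
      · simp [hl, hneg, hs, hp]
      · simp [hl, hneg, hs, hp]
  · simp [hl]
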